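-- pv_equiv track=rewrite | github.com/stellalisy/HorizonBench | scripts/compute_annotator_agreement.py | compute_majority_vote
-- ===== SOURCE A (Python) =====
-- from collections import Counter
-- from typing import List, Dict
--
-- def compute_majority_vote(annotations: List[List[str]]) -> List[str]:
--     """Compute majority vote for each item. In case of tie, prefer non-DISCARD answers."""
--     n_items = len(annotations[0])
--     majority_votes = []
--
--     for item_idx in range(n_items):
--         item_annotations = [annotations[ann_idx][item_idx] for ann_idx in range(len(annotations))]
--
--         # Count votes for each option
--         vote_counts = Counter(item_annotations)
--
--         # Find the most common vote
--         most_common = vote_counts.most_common(1)[0]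
--
--         # If there's a tie, prefer non-DISCARD answers
--         if len(vote_counts) > 1:
--             # Check if there are multiple options with the same count
--             max_count = most_common[1]
--             tied_options = [opt for opt, count in vote_counts.items() if count == max_count]
--
--             if len(tied_options) > 1:
--                 # Prefer non-DISCARD options in case of tie
--                 non_discard_options = [opt for opt in tied_options if opt != 'DISCARD']
--                 if non_discard_options:
--                     majority_votes.append(non_discard_options[0])
--                 else:
--                     majority_votes.append('DISCARD')
--             else:
--                 majority_votes.append(most_common[0])
--         else:
--             majority_votes.append(most_common[0])
--
--     return majority_votes
-- ===== SOURCE B (Python) =====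
-- from typing import List
--
-- def compute_majority_vote(annotations: List[List[str]]) -> List[str]:
--     """Majority vote per item, computed without Counter/most_common: scan the
--     column once; at each FIRST occurrence of an option count it by a list scan
--     and update a running winner (strictly more votes wins; on equal votes a
--     non-DISCARD option replaces a DISCARD winner)."""
--     n_items = len(annotations[0])
--     majority_votes = []
--     for item_idx in range(n_items):
--         col = [annotations[ann_idx][item_idx] for ann_idx in range(len(annotations))]
--         winner, best = None, -1
--         for j, v in enumerate(col):
--             if v in col[:j]:
--                 continue
--             c = col.count(v)
--             if c > best or (c == best and winner == 'DISCARD' and v != 'DISCARD'):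
--                 winner, best = v, c
--         majority_votes.append(winner)
--     return majority_votes
-- ===== Notes on version B (the rewrite author's own statement) =====
-- stated objective: alternative
-- what changed: B drops Counter/most_common and the tied-options filtering entirely: it makes one online pass over each column, detecting first occurrences with a prefix membership test, counting each distinct option by a direct list scan (col.count), and maintaining a running (winner, best) accumulator where a strictly larger count wins and an equal count replaces the winner only when the winner is DISCARD and the newcomer is not.
import Mathlib
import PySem

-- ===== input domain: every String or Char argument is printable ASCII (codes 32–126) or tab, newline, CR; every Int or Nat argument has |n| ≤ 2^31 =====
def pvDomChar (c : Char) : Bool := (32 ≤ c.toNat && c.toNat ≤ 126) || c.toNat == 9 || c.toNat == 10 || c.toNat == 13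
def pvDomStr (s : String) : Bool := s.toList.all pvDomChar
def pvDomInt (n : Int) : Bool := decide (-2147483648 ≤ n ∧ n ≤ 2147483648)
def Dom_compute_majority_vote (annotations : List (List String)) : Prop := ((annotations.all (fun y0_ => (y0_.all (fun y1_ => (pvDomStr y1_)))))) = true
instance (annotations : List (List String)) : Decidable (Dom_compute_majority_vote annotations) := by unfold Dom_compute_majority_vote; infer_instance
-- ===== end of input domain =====

-- B replaces A's Counter/most_common/tied-options machinery by one online pass per column:
-- first occurrences are detected by a prefix membership test, counted by a direct list scan,
-- and a running (winner, best) accumulator is updated (alternative decomposition, not faster).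

-- ===== PORT A =====
-- shared by both ports: the column [annotations[ann_idx][item_idx] for ann_idx in range(len(annotations))]
-- (pyGetD with defaults: the raising indexings are excluded by Pre_ below)
def pvColumn (annotations : List (List String)) (i : Nat) : List String :=
  (List.range annotations.length).map fun ai =>
    PySem.List.pyGetD (PySem.List.pyGetD annotations (ai : Int) []) (i : Int) ""

-- Python's first-wins maximum by an integer key (max / Counter.most_common(1) tie rule)
def pvMaxBy (f : String × Int → Int) (b : String × Int) (l : List (String × Int)) : String × Int :=
  l.foldl (fun best p => if f p > f best then p else best) b

-- A's per-item body after 'vote_counts = Counter(item_annotations)'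
def pvPickA (kv : String × Int) (rest : List (String × Int)) : String :=
  let mc := pvMaxBy (fun p => p.2) kv rest
  if (kv :: rest).length > 1 then
    let maxCount := mc.2
    let tied := ((kv :: rest).filter (fun p => p.2 == maxCount)).map (fun p => p.1)
    if tied.length > 1 then
      match tied.filter (fun o => !(o == "DISCARD")) with
      | [] => "DISCARD"
      | o :: _ => o
    else mc.1
  else mc.1

def pvVoteA (col : List String) : String :=
  match (PySem.Dict.counter col).items with
  | [] => ""   -- unreachable under Pre_: Python raises IndexError on an empty column
  | kv :: rest => pvPickA kv rest

def compute_majority_vote (annotations : List (List String)) : List String :=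
  (List.range (PySem.List.pyGetD annotations (0 : Int) []).length).map
    (fun i => pvVoteA (pvColumn annotations i))

-- ===== PORT B =====
-- the body of B's inner 'for j, v in enumerate(col)' loop; state = ((winner, best), j)
def pvStepB (col : List String) (s : (Option String × Int) × Nat) (v : String) :
    (Option String × Int) × Nat :=
  if (PySem.List.slice col none (some (s.2 : Int))).contains v then (s.1, s.2 + 1)
  else
    let c : Int := (PySem.List.count col v : Int)
    if c > s.1.2 || (c == s.1.2 && s.1.1 == some "DISCARD" && !(v == "DISCARD"))
    then ((some v, c), s.2 + 1)
    else (s.1, s.2 + 1)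

def pvVoteB (col : List String) : String :=
  match (col.foldl (pvStepB col) ((none, -1), 0)).1.1 with
  | some w => w
  | none => ""   -- unreachable under Pre_: the column is nonempty, so winner is never None

def compute_majority_vote_alt (annotations : List (List String)) : List String :=
  (List.range (PySem.List.pyGetD annotations (0 : Int) []).length).map
    (fun i => pvVoteB (pvColumn annotations i))

-- ===== PRECONDITION & SPEC =====
-- Pre_ excludes exactly the inputs where A raises IndexError: an empty annotations list
-- (annotations[0]) and ragged input where some row is shorter than the first row.
def Pre_compute_majority_vote (annotations : List (List String)) : Prop :=
  annotations ≠ [] ∧ ∀ row ∈ annotations, (annotations.headD []).length ≤ row.length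
instance (annotations : List (List String)) : Decidable (Pre_compute_majority_vote annotations) := by unfold Pre_compute_majority_vote; infer_instance

def pvWitness_compute_majority_vote : List (List String) :=
  [["A", "B", "DISCARD"], ["A", "DISCARD", "C"], ["B", "DISCARD", "C"]]

def Spec_compute_majority_vote (annotations : List (List String)) (out : List String) : Prop := out = compute_majority_vote_alt annotations
instance (annotations : List (List String)) (out : List String) : Decidable (Spec_compute_majority_vote annotations out) := by unfold Spec_compute_majority_vote; infer_instance

-- ===== CLAIM (what is proved, stated in full; the proofs are below) =====
def Claim_equal_compute_majority_vote : Prop := ∀ (annotations : List (List String)), Dom_compute_majority_vote annotations → Pre_compute_majority_vote annotations → Spec_compute_majority_vote annotations (compute_majority_vote annotations)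

-- ===== LEMMAS AND PROOFS =====

-- the strict comparison behind B's update rule, as a predicate on (option, count) pairs
def pvLexGT (p q : String × Int) : Bool :=
  p.2 > q.2 || (p.2 == q.2 && !(p.1 == "DISCARD") && q.1 == "DISCARD")

-- A's per-column answer rephrased as a first-wins keyed maximum over the counter items
def pvVoteKey (col : List String) : String :=
  match (PySem.Dict.counter col).items with
  | [] => ""
  | kv :: rest => (rest.foldl (fun best p => if pvLexGT p best then p else best) kv).1

-- the lexicographic key (count, option ≠ 'DISCARD') flattened into one integer
def pvKey (p : String × Int) : Int := 2 * p.2 + (if p.1 = "DISCARD" then 0 else 1)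

theorem pvKey_bounds (p : String × Int) : 2 * p.2 ≤ pvKey p ∧ pvKey p ≤ 2 * p.2 + 1 := by
  unfold pvKey; split_ifs <;> omega

theorem pvLexGT_iff (p q : String × Int) : pvLexGT p q = true ↔ pvKey q < pvKey p := by
  unfold pvLexGT pvKey
  by_cases hp : p.1 = "DISCARD" <;> by_cases hq : q.1 = "DISCARD" <;>
    simp [hp, hq] <;> omega

theorem pvFoldB_eq_maxBy (kv : String × Int) (rest : List (String × Int)) :
    rest.foldl (fun best p => if pvLexGT p best then p else best) kv = pvMaxBy pvKey kv rest := by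
  unfold pvMaxBy
  have hstep : (fun (best p : String × Int) => if pvLexGT p best then p else best)
      = (fun best p => if pvKey p > pvKey best then p else best) := by
    funext b p
    by_cases h : pvKey p > pvKey b
    · rw [if_pos ((pvLexGT_iff p b).mpr h), if_pos h]
    · rw [if_neg (fun hc => h ((pvLexGT_iff p b).mp hc)), if_neg h]
  rw [hstep]

theorem pvMaxBy_cons (f : String × Int → Int) (b p : String × Int) (l : List (String × Int)) :
    pvMaxBy f b (p :: l) = pvMaxBy f (if f p > f b then p else b) l := rfl

theorem pvMaxBy_le_self (f : String × Int → Int) (l : List (String × Int)) :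
    ∀ b, f b ≤ f (pvMaxBy f b l) := by
  induction l with
  | nil => intro b; simp [pvMaxBy]
  | cons p l ih =>
    intro b
    rw [pvMaxBy_cons]
    refine le_trans ?_ (ih _)
    split_ifs with h
    · omega
    · exact le_refl _

theorem pvMaxBy_mem (f : String × Int → Int) (l : List (String × Int)) :
    ∀ b, pvMaxBy f b l ∈ b :: l := by
  induction l with
  | nil => intro b; simp [pvMaxBy]
  | cons p l ih =>
    intro b
    rw [pvMaxBy_cons]
    by_cases h : f p > f b <;> [rw [if_pos h]; rw [if_neg h]] <;>
      [have := ih p; have := ih b] <;> simp only [List.mem_cons] at this ⊢ <;> tauto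

theorem pvMaxBy_ub (f : String × Int → Int) (l : List (String × Int)) :
    ∀ b q, q ∈ b :: l → f q ≤ f (pvMaxBy f b l) := by
  induction l with
  | nil => intro b q hq; simp at hq; subst hq; simp [pvMaxBy]
  | cons p l ih =>
    intro b q hq
    rw [pvMaxBy_cons]
    simp only [List.mem_cons] at hq
    rcases hq with rfl | rfl | hq
    · refine le_trans ?_ (pvMaxBy_le_self f l _)
      split_ifs with h <;> omega
    · refine le_trans ?_ (pvMaxBy_le_self f l _)
      split_ifs with h <;> omega
    · exact ih _ q (List.mem_cons_of_mem _ hq)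

theorem pvMaxBy_find? (f : String × Int → Int) (l : List (String × Int)) :
    ∀ b, (b :: l).find? (fun q => f q == f (pvMaxBy f b l)) = some (pvMaxBy f b l) := by
  induction l with
  | nil => intro b; simp [pvMaxBy, List.find?]
  | cons p l ih =>
    intro b
    rw [pvMaxBy_cons]
    by_cases hpb : f p > f b
    · rw [if_pos hpb]
      have hIH := ih p
      have hle : f p ≤ f (pvMaxBy f p l) := pvMaxBy_le_self f l p
      have hb : ¬ f b = f (pvMaxBy f p l) := by omega
      rw [List.find?_cons_of_neg (by simpa using hb)]
      exact hIH
    · rw [if_neg hpb]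
      have hIH := ih b
      have hle : f b ≤ f (pvMaxBy f b l) := pvMaxBy_le_self f l b
      by_cases hb : f b = f (pvMaxBy f b l)
      · rw [List.find?_cons_of_pos (by simpa using hb)]
        rw [List.find?_cons_of_pos (by simpa using hb)] at hIH
        exact hIH
      · rw [List.find?_cons_of_neg (by simpa using hb)]
        rw [List.find?_cons_of_neg (by simpa using hb)] at hIH
        have hp : ¬ f p = f (pvMaxBy f b l) := by omega
        rw [List.find?_cons_of_neg (by simpa using hp)]
        exact hIH

-- find? respects predicates that agree on the list's members
theorem pvFind?_congr_mem {α : Type} (l : List α) (p q : α → Bool)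
    (h : ∀ x ∈ l, p x = q x) : l.find? p = l.find? q := by
  induction l with
  | nil => rfl
  | cons a l ih =>
    have ha := h a (List.mem_cons_self ..)
    by_cases hpa : p a = true
    · rw [List.find?_cons_of_pos hpa, List.find?_cons_of_pos (ha ▸ hpa)]
    · rw [List.find?_cons_of_neg hpa, List.find?_cons_of_neg (by rw [← ha]; exact hpa)]
      exact ih (fun x hx => h x (List.mem_cons_of_mem _ hx))

-- the central fact on A's side: A's branching and the keyed first-wins max pick the same option
theorem pvPick_eq (kv : String × Int) (rest : List (String × Int)) :
    pvPickA kv rest = (rest.foldl (fun best p => if pvLexGT p best then p else best) kv).1 := by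
  rw [pvFoldB_eq_maxBy]
  simp only [pvPickA]
  set mc := pvMaxBy (fun p => p.2) kv rest with hmc
  set r := pvMaxBy pvKey kv rest with hr
  set M := mc.2 with hM
  have hmcmem : mc ∈ kv :: rest := pvMaxBy_mem _ rest kv
  have hrmem : r ∈ kv :: rest := pvMaxBy_mem _ rest kv
  have hr2 : r.2 = M := by
    have h1 : r.2 ≤ M := pvMaxBy_ub (fun p => p.2) rest kv r hrmem
    have h2 : pvKey mc ≤ pvKey r := pvMaxBy_ub pvKey rest kv mc hmcmem
    have b1 := pvKey_bounds mc
    have b2 := pvKey_bounds r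
    omega
  cases hfind : (kv :: rest).find? (fun q => !(q.1 == "DISCARD") && q.2 == M) with
  | some q =>
    have hq := List.find?_some hfind
    have hqmem := List.mem_of_find?_eq_some hfind
    simp only [Bool.and_eq_true, beq_iff_eq, Bool.not_eq_eq_eq_not, Bool.not_true,
      beq_eq_false_iff_ne, ne_eq] at hq
    obtain ⟨hq1, hq2⟩ := hq
    have hkq : pvKey q = 2 * M + 1 := by simp only [pvKey, if_neg hq1]; omega
    have hkr : pvKey q ≤ pvKey r := pvMaxBy_ub pvKey rest kv q hqmem
    have hr1 : r.1 ≠ "DISCARD" := by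
      intro hcon
      have : pvKey r = 2 * M := by simp only [pvKey, if_pos hcon]; omega
      omega
    have hkrval : pvKey r = 2 * M + 1 := by simp only [pvKey, if_neg hr1]; omega
    -- B's pick is exactly the element find? returns
    have hrq : r = q := by
      have hfk := pvMaxBy_find? pvKey rest kv
      rw [← hr] at hfk
      have hcong : (kv :: rest).find? (fun q' => pvKey q' == pvKey r)
          = (kv :: rest).find? (fun q' => !(q'.1 == "DISCARD") && q'.2 == M) := by
        apply pvFind?_congr_mem
        intro x hx
        have hxle : x.2 ≤ M := pvMaxBy_ub (fun p => p.2) rest kv x hx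
        by_cases hx1 : x.1 = "DISCARD"
        · have hkx : pvKey x = 2 * x.2 := by simp only [pvKey, if_pos hx1]; omega
          simp only [hkx, hkrval, hx1]
          simp only [beq_self_eq_true, Bool.not_true, Bool.false_and]
          simp only [beq_eq_false_iff_ne, ne_eq]
          omega
        · have hkx : pvKey x = 2 * x.2 + 1 := by simp only [pvKey, if_neg hx1]
          simp only [hkx, hkrval]
          have : (x.1 == "DISCARD") = false := by simpa using hx1
          simp only [this, Bool.not_false, Bool.true_and]
          by_cases h2 : x.2 = M
          · simp [h2]
          · have : ¬ (2 * x.2 + 1 = 2 * M + 1) := by omega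
            simp [this, h2]
      rw [hcong, hfind] at hfk
      exact (Option.some.inj hfk).symm
    rw [hrq]
    -- A's branches all produce q.1
    by_cases hlen : (kv :: rest).length > 1
    · rw [if_pos hlen]
      by_cases htied : (((kv :: rest).filter (fun p => p.2 == M)).map (fun p => p.1)).length > 1
      · rw [if_pos htied]
        have hnd : ((((kv :: rest).filter (fun p => p.2 == M)).map (fun p => p.1)).filter
            (fun o => !(o == "DISCARD"))).head? = some q.1 := by
          rw [List.filter_map, List.filter_filter, List.head?_map, List.head?_filter]
          have : ((kv :: rest).find? (fun a => ((fun o => !(o == "DISCARD")) ∘ fun p => p.1) a && a.2 == M))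
              = some q := by
            rw [← hfind]; rfl
          rw [this]
          rfl
        cases hnds : (((kv :: rest).filter (fun p => p.2 == M)).map (fun p => p.1)).filter
            (fun o => !(o == "DISCARD")) with
        | nil => rw [hnds] at hnd; simp at hnd
        | cons o t =>
          rw [hnds] at hnd
          simp only [List.head?_cons, Option.some.injEq] at hnd
          simp [hnd]
      · rw [if_neg htied]
        -- the filter keeps exactly one element, which is both mc and q
        have hT1 : ((kv :: rest).filter (fun p => p.2 == M)).length ≤ 1 := by
          simp only [List.length_map] at htied; omega
        have hmcT : mc ∈ (kv :: rest).filter (fun p => p.2 == M) :=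
          List.mem_filter.mpr ⟨hmcmem, by simp [hM]⟩
        have hqT : q ∈ (kv :: rest).filter (fun p => p.2 == M) :=
          List.mem_filter.mpr ⟨hqmem, by simp [hq2]⟩
        obtain ⟨x, hTv⟩ : ∃ x, (kv :: rest).filter (fun p => p.2 == M) = [x] := by
          cases hTv : (kv :: rest).filter (fun p => p.2 == M) with
          | nil => rw [hTv] at hmcT; simp at hmcT
          | cons a u =>
            cases u with
            | nil => exact ⟨a, rfl⟩
            | cons b u => rw [hTv] at hT1; simp at hT1
        rw [hTv] at hmcT hqT
        simp only [List.mem_singleton] at hmcT hqT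
        rw [← hmcT] at hqT
        rw [hqT]
    · rw [if_neg hlen]
      -- rest = [], so mc = kv = q
      have hrest : rest = [] := by
        simp only [List.length_cons, gt_iff_lt, not_lt] at hlen
        cases rest with
        | nil => rfl
        | cons a t => simp at hlen
      subst hrest
      have : q = kv := by simpa using hqmem
      rw [this, hmc]
      rfl
  | none =>
    have hall : ∀ x ∈ kv :: rest, x.2 = M → x.1 = "DISCARD" := by
      intro x hx hx2
      have := (List.find?_eq_none.mp hfind) x hx
      simp only [Bool.and_eq_true, Bool.not_eq_eq_eq_not, Bool.not_true, beq_eq_false_iff_ne,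
        ne_eq, beq_iff_eq, not_and] at this
      by_contra hcon
      exact (this hcon) hx2
    have hrD : r.1 = "DISCARD" := hall r hrmem hr2
    have hmcD : mc.1 = "DISCARD" := hall mc hmcmem rfl
    rw [hrD]
    by_cases hlen : (kv :: rest).length > 1
    · rw [if_pos hlen]
      by_cases htied : (((kv :: rest).filter (fun p => p.2 == M)).map (fun p => p.1)).length > 1
      · rw [if_pos htied]
        have hnd : (((kv :: rest).filter (fun p => p.2 == M)).map (fun p => p.1)).filter
            (fun o => !(o == "DISCARD")) = [] := by
          rw [List.filter_map, List.filter_filter]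
          have : (kv :: rest).filter (fun a => ((fun o => !(o == "DISCARD")) ∘ fun p => p.1) a && a.2 == M) = [] := by
            rw [List.filter_eq_nil_iff]
            intro a ha
            have := List.find?_eq_none.mp hfind a ha
            simpa using this
          rw [this]
          rfl
        rw [hnd]
      · rw [if_neg htied]
        exact hmcD
    · rw [if_neg hlen]
      exact hmcD

theorem pvVoteA_eq_key (col : List String) : pvVoteA col = pvVoteKey col := by
  unfold pvVoteA pvVoteKey
  cases h : (PySem.Dict.counter col).items with
  | nil => rfl
  | cons kv rest => exact pvPick_eq kv rest

-- ===== B-side lemmas: the online scan equals the keyed max over the counter items =====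

-- pvKeyStep: the pure (winner, best) update B performs at a first occurrence
def pvKeyStep (col : List String) (t : String × Int) (v : String) : String × Int :=
  if pvLexGT (v, (PySem.List.count col v : Int)) t then (v, (PySem.List.count col v : Int)) else t

-- the first occurrences of l that are not already in p, in order
def pvNew (p : List String) : List String → List String
  | [] => []
  | v :: t => if p.contains v then pvNew p t else v :: pvNew (p ++ [v]) t

theorem pvNew_congr (p q : List String) (l : List String)
    (h : ∀ x, p.contains x = q.contains x) : pvNew p l = pvNew q l := by
  induction l generalizing p q with
  | nil => rfl
  | cons v t ih =>
    unfold pvNew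
    rw [h v]
    by_cases hv : q.contains v = true
    · rw [if_pos hv, if_pos hv]; exact ih p q h
    · rw [if_neg hv, if_neg hv]
      have : ∀ x, (p ++ [v]).contains x = (q ++ [v]).contains x := by
        intro x; rw [List.contains_append, List.contains_append, h x]
      rw [ih (p ++ [v]) (q ++ [v]) this]

theorem pvFoldl_add_eq (l p : List String) : l.foldl PySem.Set.add p = p ++ pvNew p l := by
  induction l generalizing p with
  | nil => simp [pvNew]
  | cons v t ih =>
    simp only [List.foldl_cons, pvNew, PySem.Set.add, PySem.Set.contains]
    by_cases hv : p.contains v = true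
    · rw [if_pos hv, if_pos hv, ih]
    · rw [if_neg hv, if_neg hv, ih]
      simp

theorem pvOfList_cons (v : String) (t : List String) :
    PySem.Set.ofList (v :: t) = v :: pvNew [v] t := by
  have h0 : PySem.Set.add PySem.Set.empty v = [v] := by
    simp [PySem.Set.add, PySem.Set.empty, PySem.Set.contains]
  simp only [PySem.Set.ofList, List.foldl_cons, h0]
  simpa using pvFoldl_add_eq t [v]

-- B's branch condition is exactly pvLexGT on the (option, count) pairs
theorem pvCond_eq (c b : Int) (v w : String) :
    (c > b || (c == b && (some w == some "DISCARD") && !(v == "DISCARD")))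
      = pvLexGT (v, c) (w, b) := by
  unfold pvLexGT
  cases h1 : (v == "DISCARD") <;> cases h2 : (w == "DISCARD") <;> simp [h2]

-- the main invariant: once a winner exists, B's remaining loop is the keyed fold
-- over the not-yet-seen first occurrences
theorem pvFoldB_main (col : List String) :
    ∀ (rest pre : List String) (w : String) (b : Int), pre ++ rest = col →
      (rest.foldl (pvStepB col) ((some w, b), pre.length)).1
        = (fun r : String × Int => (some r.1, r.2)) ((pvNew pre rest).foldl (pvKeyStep col) (w, b)) := by
  intro rest
  induction rest with
  | nil => intro pre w b _; simp [pvNew]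
  | cons v t ih =>
    intro pre w b hpre
    have hslice : PySem.List.slice col none (some ((pre.length : Nat) : Int)) = pre := by
      rw [PySem.List.slice_to col (Int.natCast_nonneg pre.length)]
      simp only [Int.toNat_natCast]
      rw [← hpre, List.take_left]
    simp only [List.foldl_cons, pvStepB, hslice]
    by_cases hv : pre.contains v = true
    · rw [if_pos hv]
      have hpre' : (pre ++ [v]) ++ t = col := by simpa using hpre
      have hih := ih (pre ++ [v]) w b hpre'
      simp only [List.length_append, List.length_cons, List.length_nil] at hih
      rw [show pre.length + 1 = pre.length + (0 + 1) by omega, hih]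
      have hcongr : pvNew (pre ++ [v]) t = pvNew pre t := by
        apply pvNew_congr
        intro x
        rw [List.contains_append]
        by_cases hx : x = v
        · subst hx; simp only [hv, Bool.true_or]
        · simp [hx]
      have hN : pvNew pre (v :: t) = pvNew pre t := by
        simp only [pvNew]; rw [if_pos hv]
      rw [hcongr, hN]
    · rw [if_neg hv]
      have hpre' : (pre ++ [v]) ++ t = col := by simpa using hpre
      simp only [pvCond_eq]
      have hN : pvNew pre (v :: t) = v :: pvNew (pre ++ [v]) t := by
        simp only [pvNew]; rw [if_neg hv]
      rw [hN, List.foldl_cons]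
      by_cases hcond : pvLexGT (v, (PySem.List.count col v : Int)) (w, b) = true
      · rw [if_pos hcond]
        have hih := ih (pre ++ [v]) v (PySem.List.count col v : Int) hpre'
        simp only [List.length_append, List.length_cons, List.length_nil] at hih
        rw [show pre.length + 1 = pre.length + (0 + 1) by omega, hih]
        simp only [pvKeyStep]
        rw [if_pos hcond]
      · rw [if_neg hcond]
        have hih := ih (pre ++ [v]) w b hpre'
        simp only [List.length_append, List.length_cons, List.length_nil] at hih
        rw [show pre.length + 1 = pre.length + (0 + 1) by omega, hih]
        simp only [pvKeyStep]
        rw [if_neg hcond]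

theorem pvVoteB_eq_key (col : List String) : pvVoteB col = pvVoteKey col := by
  cases col with
  | nil => rfl
  | cons v t =>
    unfold pvVoteB pvVoteKey
    have hsl0 : PySem.List.slice (v :: t) none (some ((0 : Nat) : Int)) = [] := by
      rw [PySem.List.slice_to (v :: t) (Int.natCast_nonneg 0)]
      rfl
    have hstep1 : pvStepB (v :: t) ((none, -1), 0) v
        = ((some v, (PySem.List.count (v :: t) v : Int)), 0 + 1) := by
      simp only [pvStepB, hsl0]
      rw [if_neg (by simp)]
      rw [if_pos (by simp only [Bool.or_eq_true, decide_eq_true_eq]; left; omega)]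
    have hmain := pvFoldB_main (v :: t) t [v] v (PySem.List.count (v :: t) v : Int) rfl
    simp only [List.length_cons, List.length_nil] at hmain
    rw [List.foldl_cons, hstep1, hmain]
    rw [PySem.Dict.items_counter, pvOfList_cons, List.map_cons]
    show (List.foldl (pvKeyStep (v :: t)) (v, (PySem.List.count (v :: t) v : Int)) (pvNew [v] t)).1
        = (List.foldl (fun best p => if pvLexGT p best then p else best)
            (v, ((List.count v (v :: t) : Nat) : Int))
            ((pvNew [v] t).map (fun k => (k, ((List.count k (v :: t) : Nat) : Int))))).1
    rw [List.foldl_map]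
    have hfold : ∀ (l : List String) (init : String × Int),
        l.foldl (fun best k => if pvLexGT (k, ((List.count k (v :: t) : Nat) : Int)) best
            then (k, ((List.count k (v :: t) : Nat) : Int)) else best) init
        = l.foldl (pvKeyStep (v :: t)) init := by
      intro l
      induction l with
      | nil => intro init; rfl
      | cons a u ihu =>
        intro init
        simp only [List.foldl_cons, ihu]
        congr 1
    rw [hfold, PySem.List.count_eq]

theorem pvVote_eq (col : List String) : pvVoteA col = pvVoteB col := by
  rw [pvVoteA_eq_key, pvVoteB_eq_key]

-- ===== VERDICT (by name: the statement is the Claim_ definition above) =====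
theorem compute_majority_vote_spec : Claim_equal_compute_majority_vote := by
  intro annotations _ _
  unfold Spec_compute_majority_vote compute_majority_vote compute_majority_vote_alt
  simp [pvVote_eq]
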